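-- pv_equiv track=rewrite | github.com/tweaky3047/spart-coding-club | number_baseball_def.py | number_check
-- ===== SOURCE A (Python) =====
-- def number_check(a,b):
--         strike=0
--         for i in range(len(a)):
--             if a[i] == b[i]:
--                 strike = strike+1
--         g= len([val for val in a if val in b])
--         ball = g - strike
--
--         return ball, strike
-- ===== SOURCE B (Python) =====
-- def number_check(a, b):
--     ball = 0
--     strike = 0
--     for i, x in enumerate(a):
--         if x == b[i]:
--             strike += 1
--         elif x in b:
--             ball += 1
--     return ball, strike
-- ===== Notes on version B (the rewrite author's own statement) =====
-- stated objective: simpler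
-- what changed: Replaces A's separate strike loop plus a membership-count comprehension and the subtraction ball = g - strike with a single enumerate pass that accumulates ball directly (strike positions contribute nothing to ball since a[i]==b[i] implies a[i] in b).
import Mathlib
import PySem

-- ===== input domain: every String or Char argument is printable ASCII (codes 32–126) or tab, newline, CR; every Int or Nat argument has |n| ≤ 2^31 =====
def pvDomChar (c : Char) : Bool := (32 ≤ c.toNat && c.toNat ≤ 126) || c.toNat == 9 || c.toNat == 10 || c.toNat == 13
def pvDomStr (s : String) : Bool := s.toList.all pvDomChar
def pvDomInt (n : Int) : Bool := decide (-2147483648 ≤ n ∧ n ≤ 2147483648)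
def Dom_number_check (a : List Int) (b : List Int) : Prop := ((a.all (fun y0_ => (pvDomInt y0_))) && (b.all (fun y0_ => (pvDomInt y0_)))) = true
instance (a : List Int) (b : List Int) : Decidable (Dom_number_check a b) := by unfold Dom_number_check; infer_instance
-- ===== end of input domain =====

-- B replaces A's strike loop + membership-count pass + subtraction with one enumerate
-- pass that accumulates ball directly (simpler; same asymptotic cost).


-- ===== PORT A =====
def number_check (a : List Int) (b : List Int) : Int × Int :=
  let strike : Int :=
    (PySem.List.pyRange 0 (PySem.List.len a) 1).foldl
      (fun strike i =>
        if PySem.List.pyGetD a i 0 = PySem.List.pyGetD b i 0 then strike + 1 else strike) 0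
  let g : Int := ((a.filter (fun val => decide (val ∈ b))).length : Int)
  let ball : Int := g - strike
  (ball, strike)

-- ===== PORT B =====
def number_check_alt (a : List Int) (b : List Int) : Int × Int :=
  (PySem.List.enumerate a).foldl
    (fun q ix =>
      if ix.2 = PySem.List.pyGetD b ix.1 0 then (q.1, q.2 + 1)
      else if ix.2 ∈ b then (q.1 + 1, q.2) else q) (0, 0)

-- ===== PRECONDITION & SPEC =====
-- Pre_: A (and B) raise IndexError on b[i] when b is shorter than a.
def Pre_number_check (a : List Int) (b : List Int) : Prop := a.length ≤ b.length
instance (a : List Int) (b : List Int) : Decidable (Pre_number_check a b) := by unfold Pre_number_check; infer_instance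
def pvWitness_number_check : List Int × List Int := ([1, 2, 3], [3, 2, 4])

def Spec_number_check (a : List Int) (b : List Int) (out : Int × Int) : Prop := out = number_check_alt a b
instance (a : List Int) (b : List Int) (out : Int × Int) : Decidable (Spec_number_check a b out) := by unfold Spec_number_check; infer_instance

-- ===== CLAIM (what is proved, stated in full; the proofs are below) =====
def Claim_equal_number_check : Prop := ∀ (a : List Int) (b : List Int), Dom_number_check a b → Pre_number_check a b → Spec_number_check a b (number_check a b)

-- ===== LEMMAS AND PROOFS =====

-- reading the zipped pair at index i reads the two lists at index i
theorem pvZipGetD (a b : List Int) (i : Int) (h0 : 0 ≤ i) (hi : i < (a.length : Int))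
    (hab : a.length ≤ b.length) :
    PySem.List.pyGetD (a.zip b) i (0, 0) =
      (PySem.List.pyGetD a i 0, PySem.List.pyGetD b i 0) := by
  have hz : i < (((a.zip b).length : Nat) : Int) := by
    simp [List.length_zip]; omega
  have hb : i < (b.length : Int) := by omega
  rw [PySem.List.pyGetD_eq_getElem (a.zip b) (0, 0) h0 hz,
      PySem.List.pyGetD_eq_getElem a 0 h0 hi,
      PySem.List.pyGetD_eq_getElem b 0 h0 hb]
  exact List.getElem_zip ..

-- A's strike loop counts equal positions
theorem pvStrikeCount (c : List (Int × Int)) (st : Int) :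
    c.foldl (fun s p => if p.1 = p.2 then s + 1 else s) st
      = st + (c.countP (fun p => decide (p.1 = p.2)) : Int) := by
  induction c generalizing st with
  | nil => simp
  | cons p c ih =>
    by_cases h : p.1 = p.2 <;>
      simp [List.foldl_cons, h, ih]; ring

-- B's single pass, characterised over the zipped list
theorem pvAltFold (b : List Int) (c : List (Int × Int)) (hmem : ∀ p ∈ c, p.2 ∈ b) :
    ∀ bl st : Int,
      c.foldl (fun q p => if p.1 = p.2 then (q.1, q.2 + 1)
                          else if p.1 ∈ b then (q.1 + 1, q.2) else q) (bl, st)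
        = (bl + ((c.countP (fun p => decide (p.1 ∈ b)) : Int)
                  - (c.countP (fun p => decide (p.1 = p.2)) : Int)),
           st + (c.countP (fun p => decide (p.1 = p.2)) : Int)) := by
  induction c with
  | nil => intro bl st; simp
  | cons p c ih =>
    intro bl st
    have hmem' : ∀ q ∈ c, q.2 ∈ b := fun q hq => hmem q (List.mem_cons_of_mem _ hq)
    have hp2 : p.2 ∈ b := hmem p List.mem_cons_self
    by_cases h : p.1 = p.2
    · have hin : p.1 ∈ b := h ▸ hp2
      simp only [List.foldl_cons, List.countP_cons, h, if_pos, ih hmem', hp2,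
        decide_true, Prod.mk.injEq]
      constructor <;> (push_cast; ring)
    · by_cases hin : p.1 ∈ b <;>
        · simp only [List.foldl_cons, List.countP_cons, h, hin, decide_true,
            decide_false, if_false, if_true, ih hmem', Prod.mk.injEq]
          constructor <;> (push_cast; ring)

-- ===== VERDICT (by name: the statement is the Claim_ definition above) =====
theorem number_check_spec : Claim_equal_number_check := by
  intro a b _ hpre
  unfold Spec_number_check number_check number_check_alt
  have hab : a.length ≤ b.length := hpre
  have hlen : ((PySem.List.len a) : Int) = (((a.zip b).length : Nat) : Int) := by
    simp [PySem.List.len_eq, List.length_zip]; omega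
  have hbound : ∀ i : Int, i ∈ PySem.List.pyRange 0 ((a.zip b).length : Int) 1 →
      0 ≤ i ∧ i < (a.length : Int) := by
    intro i hi
    have hb := (PySem.List.mem_pyRange_one).1 hi
    have : (((a.zip b).length : Nat) : Int) ≤ (a.length : Int) := by
      simp [List.length_zip]
    exact ⟨hb.1, by omega⟩
  have hA :
      (PySem.List.pyRange 0 (PySem.List.len a) 1).foldl
        (fun strike i =>
          if PySem.List.pyGetD a i 0 = PySem.List.pyGetD b i 0 then strike + 1 else strike) 0
        = (a.zip b).foldl (fun s p => if p.1 = p.2 then s + 1 else s) (0 : Int) := by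
    rw [hlen]
    calc (PySem.List.pyRange 0 (((a.zip b).length : Nat) : Int) 1).foldl
          (fun strike i =>
            if PySem.List.pyGetD a i 0 = PySem.List.pyGetD b i 0 then strike + 1 else strike) 0
        = (PySem.List.pyRange 0 (((a.zip b).length : Nat) : Int) 1).foldl
            (fun s i => (fun (s : Int) (p : Int × Int) => if p.1 = p.2 then s + 1 else s) s
              (PySem.List.pyGetD (a.zip b) i (0, 0))) 0 := by
          apply PySem.List.foldl_congr_mem'
          intro i hi s
          have hb := hbound i hi
          simp only [pvZipGetD a b i hb.1 hb.2 hab]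
      _ = (a.zip b).foldl (fun s p => if p.1 = p.2 then s + 1 else s) (0 : Int) :=
          PySem.List.foldl_pyRange_zero_pyGetD' (a.zip b) (0, 0)
            (fun (s : Int) (p : Int × Int) => if p.1 = p.2 then s + 1 else s) 0
  have hB :
      (PySem.List.enumerate a).foldl
        (fun q ix =>
          if ix.2 = PySem.List.pyGetD b ix.1 0 then (q.1, q.2 + 1)
          else if ix.2 ∈ b then (q.1 + 1, q.2) else q) ((0 : Int), (0 : Int))
        = (a.zip b).foldl (fun q p => if p.1 = p.2 then (q.1, q.2 + 1)
            else if p.1 ∈ b then (q.1 + 1, q.2) else q) (0, 0) := by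
    rw [PySem.List.enumerate_eq_map_pyRange (d := 0), List.foldl_map, hlen]
    calc (PySem.List.pyRange 0 (((a.zip b).length : Nat) : Int) 1).foldl
          (fun q i =>
            if (i, PySem.List.pyGetD a i 0).2 = PySem.List.pyGetD b (i, PySem.List.pyGetD a i 0).1 0
              then (q.1, q.2 + 1)
            else if (i, PySem.List.pyGetD a i 0).2 ∈ b then (q.1 + 1, q.2) else q) (0, 0)
        = (PySem.List.pyRange 0 (((a.zip b).length : Nat) : Int) 1).foldl
            (fun q i => (fun (q : Int × Int) (p : Int × Int) =>
              if p.1 = p.2 then (q.1, q.2 + 1)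
              else if p.1 ∈ b then (q.1 + 1, q.2) else q) q
              (PySem.List.pyGetD (a.zip b) i (0, 0))) (0, 0) := by
          apply PySem.List.foldl_congr_mem'
          intro i hi q
          have hb := hbound i hi
          simp only [pvZipGetD a b i hb.1 hb.2 hab]
      _ = (a.zip b).foldl (fun q p => if p.1 = p.2 then (q.1, q.2 + 1)
            else if p.1 ∈ b then (q.1 + 1, q.2) else q) (0, 0) :=
          PySem.List.foldl_pyRange_zero_pyGetD' (a.zip b) (0, 0)
            (fun (q : Int × Int) (p : Int × Int) =>
              if p.1 = p.2 then (q.1, q.2 + 1)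
              else if p.1 ∈ b then (q.1 + 1, q.2) else q) (0, 0)
  have hg : (a.filter (fun val => decide (val ∈ b))).length
      = (a.zip b).countP (fun p => decide (p.1 ∈ b)) := by
    conv_lhs => rw [← List.map_fst_zip hab]
    rw [← List.countP_eq_length_filter, List.countP_map]
    rfl
  simp only [hA, hB, pvStrikeCount (a.zip b) 0,
    pvAltFold b (a.zip b) (fun p hp => (List.of_mem_zip hp).2), hg, Prod.mk.injEq]
  exact ⟨by ring, trivial⟩
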